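-- pv_equiv track=rewrite | github.com/zhangxiuwen040831/airc-skill | airc_skill/core_guard.py | _extract_blank_line_signature
-- ===== SOURCE A (Python) =====
-- def _extract_blank_line_signature(text: str) -> list[int]:
--     signature: list[int] = []
--     streak = 0
--     for line in text.splitlines():
--         if line.strip():
--             if streak:
--                 signature.append(streak)
--                 streak = 0
--         else:
--             streak += 1
--     if streak:
--         signature.append(streak)
--     return signature
-- ===== SOURCE B (Python) =====
-- def _extract_blank_line_signature(text: str) -> list[int]:
--     lines = text.splitlines()
--     idx = [i for i, line in enumerate(lines) if line.strip()]
--     bounds = [-1] + idx + [len(lines)]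
--     return [b - a - 1 for a, b in zip(bounds, bounds[1:]) if b - a > 1]
-- ===== Notes on version B (the rewrite author's own statement) =====
-- stated objective: alternative
-- what changed: Replaces the streak counter with post-loop flush by an index-arithmetic formulation: collect the indices of non-blank lines, pad with -1 and len(lines), and read each blank run length as the gap between consecutive non-blank indices.
import Mathlib
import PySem

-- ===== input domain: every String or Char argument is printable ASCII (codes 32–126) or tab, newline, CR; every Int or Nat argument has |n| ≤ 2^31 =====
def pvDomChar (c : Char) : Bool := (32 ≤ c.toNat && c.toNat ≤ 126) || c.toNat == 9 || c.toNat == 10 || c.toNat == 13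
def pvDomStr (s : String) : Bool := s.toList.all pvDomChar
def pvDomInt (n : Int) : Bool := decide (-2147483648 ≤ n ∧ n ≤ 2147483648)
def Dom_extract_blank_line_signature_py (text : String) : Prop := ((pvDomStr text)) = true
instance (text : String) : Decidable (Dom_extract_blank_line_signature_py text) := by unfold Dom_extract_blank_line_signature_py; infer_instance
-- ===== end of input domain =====

-- B replaces A's streak counter + post-loop flush by index arithmetic over the
-- positions of non-blank lines (an alternative decomposition, same cost).


-- ===== PORT A =====
def extract_blank_line_signature_py (text : String) : List Int :=
  let st := (PySem.Str.splitlines text).foldl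
    (fun (acc : List Int × Int) line =>
      if PySem.Str.strip line ≠ "" then
        if acc.2 ≠ 0 then (acc.1 ++ [acc.2], 0) else acc
      else
        (acc.1, acc.2 + 1))
    ([], 0)
  if st.2 ≠ 0 then st.1 ++ [st.2] else st.1

-- ===== PORT B =====
def extract_blank_line_signature_py_alt (text : String) : List Int :=
  let lines := PySem.Str.splitlines text
  let idx := ((PySem.List.enumerate lines 0).filter
    (fun p => PySem.Str.strip p.2 ≠ "")).map (fun p => p.1)
  let bounds := [(-1 : Int)] ++ idx ++ [PySem.List.len lines]
  ((bounds.zip (bounds.drop 1)).filter (fun p => p.2 - p.1 > 1)).map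
    (fun p => p.2 - p.1 - 1)

-- ===== PRECONDITION & SPEC =====
def Spec_extract_blank_line_signature_py (text : String) (out : List Int) : Prop := out = extract_blank_line_signature_py_alt text
instance (text : String) (out : List Int) : Decidable (Spec_extract_blank_line_signature_py text out) := by unfold Spec_extract_blank_line_signature_py; infer_instance

-- ===== CLAIM (what is proved, stated in full; the proofs are below) =====
def Claim_equal_extract_blank_line_signature_py : Prop := ∀ (text : String), Dom_extract_blank_line_signature_py text → Spec_extract_blank_line_signature_py text (extract_blank_line_signature_py text)

-- ===== LEMMAS AND PROOFS =====

-- run lengths of blank (`false`) flags, with `k` blanks already pending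
def pvRuns : List Bool → Int → List Int
  | [], k => if k ≠ 0 then [k] else []
  | true :: t, k => (if k ≠ 0 then [k] else []) ++ pvRuns t 0
  | false :: t, k => pvRuns t (k + 1)

-- gap view: diffs > 1 between consecutive bounds, minus one
def pvGaps : Int → List Int → Int → List Int
  | p, [], n => if n - p > 1 then [n - p - 1] else []
  | p, a :: rest, n => (if a - p > 1 then [a - p - 1] else []) ++ pvGaps a rest n

-- positions (from offset o) of `true` flags
def pvIdxs : Int → List Bool → List Int
  | _, [] => []
  | o, b :: t => (if b then [o] else []) ++ pvIdxs (o + 1) t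

-- A's fold equals sig ++ pvRuns flags streak
theorem pvFoldA (lines : List String) (sig : List Int) (k : Int) :
    (let st := lines.foldl
        (fun (acc : List Int × Int) line =>
          if PySem.Str.strip line ≠ "" then
            if acc.2 ≠ 0 then (acc.1 ++ [acc.2], 0) else acc
          else
            (acc.1, acc.2 + 1))
        (sig, k)
      if st.2 ≠ 0 then st.1 ++ [st.2] else st.1)
      = sig ++ pvRuns (lines.map (fun l => PySem.Str.strip l ≠ "")) k := by
  induction lines generalizing sig k with
  | nil =>
    by_cases hk : k = 0 <;> simp [pvRuns, hk]
  | cons l t ih =>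
    simp only [List.foldl_cons, List.map_cons]
    by_cases hl : PySem.Str.strip l = ""
    · simpa [hl, pvRuns] using ih sig (k + 1)
    · by_cases hk : k = 0
      · simpa [hl, hk, pvRuns] using ih sig 0
      · simpa [hl, hk, pvRuns] using ih (sig ++ [k]) 0

-- B's zip/filter/map over bounds equals pvGaps
theorem pvZipGaps (l : List Int) (p n : Int) :
    (((p :: (l ++ [n])).zip ((p :: (l ++ [n])).drop 1)).filter
        (fun q => q.2 - q.1 > 1)).map (fun q => q.2 - q.1 - 1)
      = pvGaps p l n := by
  induction l generalizing p with
  | nil => by_cases h : n - p > 1 <;> simp [pvGaps, h]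
  | cons a t ih =>
    have h := ih a
    simp only [List.cons_append, List.drop_succ_cons, List.drop_zero] at h ⊢
    simp only [List.zip_cons_cons, List.filter_cons]
    by_cases hg : a - p > 1
    · simpa [pvGaps, hg] using congrArg (List.cons (a - p - 1)) h
    · simpa [pvGaps, hg] using h

-- B's enumerate/filter/map equals pvIdxs of the flags
theorem pvEnumIdxs (lines : List String) (o : Int) :
    ((PySem.List.enumerate lines o).filter
        (fun p => PySem.Str.strip p.2 ≠ "")).map (fun p => p.1)
      = pvIdxs o (lines.map (fun l => PySem.Str.strip l ≠ "")) := by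
  induction lines generalizing o with
  | nil => simp [PySem.List.enumerate_nil, pvIdxs]
  | cons l t ih =>
    simp only [PySem.List.enumerate_cons, List.map_cons, List.filter_cons, pvIdxs]
    by_cases hl : PySem.Str.strip l = "" <;>
      (simp [hl]; simpa using ih (o + 1))

-- the key correspondence: gaps between true-positions = blank-run lengths
theorem pvGaps_eq_runs (bs : List Bool) (o p k : Int) (hk : 0 ≤ k)
    (hp : p = o - 1 - k) :
    pvGaps p (pvIdxs o bs) (o + bs.length) = pvRuns bs k := by
  induction bs generalizing o p k with
  | nil =>
    subst hp
    simp only [pvIdxs, pvGaps, pvRuns, List.length_nil, Nat.cast_zero]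
    split_ifs with h1 h2 <;>
      first
        | rfl
        | (exfalso; omega)
        | (congr 1; omega)
  | cons b t ih =>
    cases b with
    | true =>
      subst hp
      have h2 : pvGaps o (pvIdxs (o + 1) t) ((o + 1) + (t.length : Int)) = pvRuns t 0 :=
        ih (o + 1) o 0 (le_refl 0) (by ring)
      simp only [pvIdxs, pvGaps, pvRuns, List.length_cons, if_true,
        List.singleton_append]
      rw [show o + (((t.length + 1 : Nat)) : Int) = (o + 1) + (t.length : Int) from
        by push_cast; ring, h2]
      by_cases hk0 : k = 0
      · simp [hk0]
      · simp [hk0, show o - (o - 1 - k) > 1 from by omega,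
          show o - (o - 1 - k) - 1 = k from by ring]
    | false =>
      subst hp
      simp only [pvIdxs, pvRuns, List.nil_append, List.length_cons,
        Bool.false_eq_true, if_false]
      rw [show o + (((t.length + 1 : Nat)) : Int) = (o + 1) + (t.length : Int) from
        by push_cast; ring]
      exact ih (o + 1) (o - 1 - k) (k + 1) (by omega) (by ring)

-- the alt port with its local `let`s unfolded (definitional)
theorem pvAltEq (text : String) :
    extract_blank_line_signature_py_alt text =
      ((([(-1 : Int)] ++ ((PySem.List.enumerate (PySem.Str.splitlines text) 0).filter
            (fun p => PySem.Str.strip p.2 ≠ "")).map (fun p => p.1)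
          ++ [PySem.List.len (PySem.Str.splitlines text)]).zip
         (([(-1 : Int)] ++ ((PySem.List.enumerate (PySem.Str.splitlines text) 0).filter
            (fun p => PySem.Str.strip p.2 ≠ "")).map (fun p => p.1)
          ++ [PySem.List.len (PySem.Str.splitlines text)]).drop 1)).filter
        (fun p => p.2 - p.1 > 1)).map (fun p => p.2 - p.1 - 1) := rfl

-- ===== VERDICT (by name: the statement is the Claim_ definition above) =====
theorem extract_blank_line_signature_py_spec : Claim_equal_extract_blank_line_signature_py := by
  intro text _
  unfold Spec_extract_blank_line_signature_py
  unfold extract_blank_line_signature_py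
  rw [pvAltEq, pvFoldA (PySem.Str.splitlines text) [] 0,
      pvEnumIdxs (PySem.Str.splitlines text) 0]
  simp only [List.nil_append, List.cons_append]
  rw [pvZipGaps (pvIdxs 0 ((PySem.Str.splitlines text).map
        (fun l => PySem.Str.strip l ≠ ""))) (-1)
        (PySem.List.len (PySem.Str.splitlines text)),
      show PySem.List.len (PySem.Str.splitlines text)
          = (0 : Int) + ((PySem.Str.splitlines text).map
              (fun l => decide (PySem.Str.strip l ≠ ""))).length from
        by simp [PySem.List.len]]
  exact (pvGaps_eq_runs _ 0 (-1) 0 (le_refl 0) (by ring)).symm
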